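-- pv_equiv track=rewrite | github.com/sferrada/athenapk_kultrun | src/commons.py | modify_athenapk_input_file
-- ===== SOURCE A (Python) =====
-- def modify_athenapk_input_file(config: dict,
--                                modifications: list) -> dict:
--     """
--     Modify a configuration dictionary based on a list of specified modifications.
--
--     Args:
--         config (dict): The original configuration dictionary to be modified.
--         modifications (list): A list of modifications, where each modification is a tuple
--         (section, key, new_value) specifying the section, key, and the new value to be set.
--
--     Returns:
--         dict: The modified configuration dictionary.
--     """
--     modified_config = config.copy()
--     for section, key, new_value in modifications:
--         if section in modified_config:
--             for i, (config_key, value, comment) in enumerate(modified_config[section]):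
--                 if config_key == key:
--                     modified_config[section][i] = (key, new_value, comment)
--     return modified_config
-- ===== SOURCE B (Python) =====
-- def modify_athenapk_input_file(config: dict, modifications: list) -> dict:
--     # Build the final (section, key) -> value map in one pass over the modifications
--     # (later modifications overwrite earlier ones, as in A); one pass over the
--     # config rewrites every entry by a single hash lookup.
--     final = {}
--     for section, key, new_value in modifications:
--         final[(section, key)] = new_value
--     return {section: [(key, final.get((section, key), value), comment)
--                       for (key, value, comment) in entries]
--             for section, entries in config.items()}
-- ===== Notes on version B (the rewrite author's own statement) =====
-- stated objective: alternative
-- what changed: Instead of rescanning the section's entry list for every modification, B builds a (section,key)->final-value map in one pass over the modifications and then rewrites the whole config in a single pass with one lookup per entry.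
import Mathlib
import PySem

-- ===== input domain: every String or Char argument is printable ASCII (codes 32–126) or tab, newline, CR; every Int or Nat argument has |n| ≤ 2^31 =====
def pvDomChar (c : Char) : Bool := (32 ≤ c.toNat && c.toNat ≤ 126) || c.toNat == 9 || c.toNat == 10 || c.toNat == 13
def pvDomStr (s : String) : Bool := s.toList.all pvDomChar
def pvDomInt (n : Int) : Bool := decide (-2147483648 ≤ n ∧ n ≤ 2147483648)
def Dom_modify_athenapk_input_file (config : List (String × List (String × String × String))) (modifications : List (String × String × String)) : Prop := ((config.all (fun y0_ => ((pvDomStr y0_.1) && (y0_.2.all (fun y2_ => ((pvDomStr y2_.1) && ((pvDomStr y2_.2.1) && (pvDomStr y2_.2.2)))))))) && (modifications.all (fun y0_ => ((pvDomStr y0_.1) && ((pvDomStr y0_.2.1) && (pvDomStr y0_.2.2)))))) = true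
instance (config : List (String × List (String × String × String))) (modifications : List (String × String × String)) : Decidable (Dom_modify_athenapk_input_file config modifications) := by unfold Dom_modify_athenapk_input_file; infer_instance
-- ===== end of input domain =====

-- B replaces A's per-modification scan of the section list by a (section,key)→value map built
-- once from the modifications, then a single rewrite pass over the config (objective: alternative).
-- A mutates config's inner lists in place (shallow dict copy); the equivalence proved here is
-- about the RETURN value only.

-- ===== PORT A =====
-- modified_config[section][i] = (key, new_value, comment)  for every matching i:
-- the inner 'for i, … in enumerate' with index assignment rewrites each matching entry in order.
def pvApplyKeyA (key new_value : String) (entries : List (String × String × String)) : List (String × String × String) :=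
  entries.map (fun t => if t.1 == key then (key, new_value, t.2.2) else t)

-- modified_config[section] is the first entry whose name equals section (dict lookup, first match)
def pvSetSectionA (cfg : List (String × List (String × String × String))) (section_ : String)
    (f : List (String × String × String) → List (String × String × String)) :
    List (String × List (String × String × String)) :=
  match cfg with
  | [] => []
  | e :: rest => if e.1 == section_ then (e.1, f e.2) :: rest else e :: pvSetSectionA rest section_ f

def modify_athenapk_input_file (config : List (String × List (String × String × String))) (modifications : List (String × String × String)) : List (String × List (String × String × String)) :=
  modifications.foldl
    (fun cfg m =>
      if cfg.any (fun e => e.1 == m.1) then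
        pvSetSectionA cfg m.1 (pvApplyKeyA m.2.1 m.2.2)
      else cfg)
    config

-- ===== PORT B =====
def modify_athenapk_input_file_alt (config : List (String × List (String × String × String))) (modifications : List (String × String × String)) : List (String × List (String × String × String)) :=
  let final := modifications.foldl
    (fun (d : PySem.Dict (String × String) String) m => d.insert (m.1, m.2.1) m.2.2)
    PySem.Dict.empty
  config.map (fun e =>
    (e.1, e.2.map (fun t => (t.1, final.getD (e.1, t.1) t.2.1, t.2.2))))

-- ===== PRECONDITION & SPEC =====
-- Pre_ requires the section names of the assoc-list encoding to be pairwise distinct: a Python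
-- dict can never hold duplicate keys, so this excludes no input the Python A ever receives; on
-- duplicated section names the first-match dict semantics of A's port and B's whole-list map differ.
def Pre_modify_athenapk_input_file (config : List (String × List (String × String × String))) (_modifications : List (String × String × String)) : Prop :=
  (config.map Prod.fst).Nodup

instance (config : List (String × List (String × String × String))) (modifications : List (String × String × String)) : Decidable (Pre_modify_athenapk_input_file config modifications) := by unfold Pre_modify_athenapk_input_file; infer_instance

def pvWitness_modify_athenapk_input_file : (List (String × List (String × String × String))) × (List (String × String × String)) :=
  ([("hydro", [("cfl", "0.3", "c"), ("nx", "64", "")]), ("out", [("dt", "1", "")])],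
   [("hydro", "cfl", "0.4"), ("out", "dt", "2"), ("hydro", "cfl", "0.5")])

def Spec_modify_athenapk_input_file (config : List (String × List (String × String × String))) (modifications : List (String × String × String)) (out : List (String × List (String × String × String))) : Prop := out = modify_athenapk_input_file_alt config modifications
instance (config : List (String × List (String × String × String))) (modifications : List (String × String × String)) (out : List (String × List (String × String × String))) : Decidable (Spec_modify_athenapk_input_file config modifications out) := by unfold Spec_modify_athenapk_input_file; infer_instance

-- ===== CLAIM (what is proved, stated in full; the proofs are below) =====
def Claim_equal_modify_athenapk_input_file : Prop := ∀ (config : List (String × List (String × String × String))) (modifications : List (String × String × String)), Dom_modify_athenapk_input_file config modifications → Pre_modify_athenapk_input_file config modifications → Spec_modify_athenapk_input_file config modifications (modify_athenapk_input_file config modifications)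

-- ===== LEMMAS AND PROOFS =====

-- per-entry effect of one modification (proof-side normal form of both programs)
def pvEntryStep (sec : String) (t : String × String × String) (m : String × String × String) :
    String × String × String :=
  if m.1 = sec ∧ t.1 = m.2.1 then (m.2.1, m.2.2, t.2.2) else t

-- a section-map whose condition never fires is the identity
theorem pv_map_id_of_not_mem (cfg : List (String × List (String × String × String)))
    (s : String) (f : List (String × String × String) → List (String × String × String))
    (h : s ∉ cfg.map Prod.fst) :
    cfg.map (fun e => if e.1 = s then (e.1, f e.2) else e) = cfg := by
  induction cfg with
  | nil => rfl
  | cons e rest ih =>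
    simp only [List.map_cons, List.mem_cons, not_or] at h ⊢
    rw [if_neg (fun he => h.1 he.symm), ih h.2]

theorem pvSetSectionA_eq_map (cfg : List (String × List (String × String × String)))
    (s : String) (f : List (String × String × String) → List (String × String × String))
    (h : (cfg.map Prod.fst).Nodup) :
    pvSetSectionA cfg s f = cfg.map (fun e => if e.1 = s then (e.1, f e.2) else e) := by
  induction cfg with
  | nil => rfl
  | cons e rest ih =>
    simp only [List.map_cons, List.nodup_cons] at h
    simp only [pvSetSectionA, List.map_cons, beq_iff_eq]
    by_cases he : e.1 = s
    · rw [if_pos he, if_pos he, pv_map_id_of_not_mem rest s f (he ▸ h.1)]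
    · rw [if_neg he, if_neg he, ih h.2]

-- one A-step, on nodup configs, is the per-entry map
theorem pv_stepA_eq_map (cfg : List (String × List (String × String × String)))
    (m : String × String × String) (h : (cfg.map Prod.fst).Nodup) :
    (if cfg.any (fun e => e.1 == m.1) then pvSetSectionA cfg m.1 (pvApplyKeyA m.2.1 m.2.2) else cfg)
      = cfg.map (fun e => if e.1 = m.1 then (e.1, pvApplyKeyA m.2.1 m.2.2 e.2) else e) := by
  by_cases hany : cfg.any (fun e => e.1 == m.1)
  · rw [if_pos hany, pvSetSectionA_eq_map cfg m.1 _ h]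
  · rw [if_neg hany, pv_map_id_of_not_mem]
    intro hm
    apply hany
    rcases List.mem_map.mp hm with ⟨e, he, hfst⟩
    exact List.any_eq_true.mpr ⟨e, he, beq_iff_eq.mpr hfst⟩

-- the per-entry map preserves section names (hence nodup)
theorem pv_map_keys (cfg : List (String × List (String × String × String)))
    (m : String × String × String) :
    ((cfg.map (fun e => if e.1 = m.1 then (e.1, pvApplyKeyA m.2.1 m.2.2 e.2) else e)).map Prod.fst)
      = cfg.map Prod.fst := by
  rw [List.map_map]
  exact List.map_congr_left (fun e _ => by by_cases he : e.1 = m.1 <;> simp [he])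

-- A, on nodup configs, is the pointwise per-entry fold
theorem pv_A_eq_entry_fold (mods : List (String × String × String))
    (cfg : List (String × List (String × String × String)))
    (h : (cfg.map Prod.fst).Nodup) :
    mods.foldl
      (fun cfg m =>
        if cfg.any (fun e => e.1 == m.1) then pvSetSectionA cfg m.1 (pvApplyKeyA m.2.1 m.2.2) else cfg)
      cfg
    = cfg.map (fun e => (e.1, e.2.map (fun t => mods.foldl (pvEntryStep e.1) t))) := by
  induction mods generalizing cfg with
  | nil => simp
  | cons m ms ih =>
    rw [List.foldl_cons, pv_stepA_eq_map cfg m h,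
        ih _ (by rw [pv_map_keys]; exact h), List.map_map]
    refine List.map_congr_left (fun e _ => ?_)
    simp only [Function.comp_apply]
    by_cases he : e.1 = m.1
    · rw [if_pos he]
      refine congrArg (Prod.mk e.1) ?_
      simp only [pvApplyKeyA, List.map_map]
      refine List.map_congr_left (fun t _ => ?_)
      simp only [Function.comp_apply, List.foldl_cons]
      have hinit : (if t.1 == m.2.1 then (m.2.1, m.2.2, t.2.2) else t) = pvEntryStep e.1 t m := by
        simp [pvEntryStep, he]
      rw [hinit]
    · rw [if_neg he]
      refine congrArg (Prod.mk e.1) ?_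
      refine List.map_congr_left (fun t _ => ?_)
      rw [List.foldl_cons]
      have hid : pvEntryStep e.1 t m = t := by
        simp only [pvEntryStep]; rw [if_neg (fun hc => he hc.1.symm)]
      rw [hid]

-- the per-entry fold keeps the name and the comment and folds the value scalarly
theorem pv_entry_fold_eq (sec : String) (mods : List (String × String × String))
    (t : String × String × String) :
    mods.foldl (pvEntryStep sec) t
      = (t.1, mods.foldl (fun r m => if (sec, t.1) = (m.1, m.2.1) then m.2.2 else r) t.2.1, t.2.2) := by
  induction mods generalizing t with
  | nil => rfl
  | cons m ms ih =>
    simp only [List.foldl_cons, pvEntryStep]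
    by_cases hc : m.1 = sec ∧ t.1 = m.2.1
    · rw [if_pos hc, ih, if_pos (by rw [hc.2, hc.1])]
      simp [hc.2]
    · rw [if_neg hc, ih, if_neg (fun h => hc ⟨(Prod.ext_iff.mp h).1.symm, (Prod.ext_iff.mp h).2⟩)]

-- B's dict lookup is the same scalar fold
theorem pv_dict_fold_getD (mods : List (String × String × String))
    (d : PySem.Dict (String × String) String) (p : String × String) (v : String) :
    (mods.foldl (fun (d : PySem.Dict (String × String) String) m => d.insert (m.1, m.2.1) m.2.2) d).getD p v
      = mods.foldl (fun r m => if p = (m.1, m.2.1) then m.2.2 else r) (d.getD p v) := by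
  induction mods generalizing d with
  | nil => rfl
  | cons m ms ih =>
    rw [List.foldl_cons, List.foldl_cons, ih, PySem.Dict.getD_insert]

-- ===== VERDICT (by name: the statement is the Claim_ definition above) =====
theorem modify_athenapk_input_file_spec : Claim_equal_modify_athenapk_input_file := by
  intro config mods _ hpre
  unfold Spec_modify_athenapk_input_file modify_athenapk_input_file modify_athenapk_input_file_alt
  rw [pv_A_eq_entry_fold mods config hpre]
  refine List.map_congr_left (fun e _ => ?_)
  refine congrArg (Prod.mk e.1) (List.map_congr_left (fun t _ => ?_))
  rw [pv_entry_fold_eq, pv_dict_fold_getD]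
  simp [PySem.Dict.getD_empty]
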